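-- pv_equiv track=rewrite | github.com/SzymonIwaniuk/data_structures_and_algorithms | random/ibm_ca4.py | networks
-- ===== SOURCE A (Python) =====
-- def networks(speed, minComps, speedThreshold):
--     n = len(speed)
--     used = [False for i in range(n)]
--     networks = 0
--     i = 0
--
--     while i <= n - minComps:
--         sum_speed = 0
--         found = False
--
--         for j in range(i, min(i + minComps, n)):
--             sum_speed += speed[j]
--
--         if sum_speed >= speedThreshold:
--             networks += 1
--             i += minComps
--             found = True
--
--         else:
--             for j in range(i + minComps, n):
--                 sum_speed += speed[j]
--                 if sum_speed >= speedThreshold: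
--                     networks += 1
--                     i = j + 1
--                     found = True
--                     break
--
--             if not found:
--                 i += 1
--
--     return networks
-- ===== SOURCE B (Python) =====
-- def networks(speed, minComps, speedThreshold):
--     n = len(speed)
--     prefix = [0] * (n + 1)
--     for k in range(n):
--         prefix[k + 1] = prefix[k] + speed[k]
--     count = 0
--     i = 0
--     while i <= n - minComps:
--         j = next((j for j in range(i + minComps - 1, n)
--                   if prefix[j + 1] - prefix[i] >= speedThreshold), None)
--         if j is None:
--             i += 1
--         else:
--             count += 1
--             i = j + 1
--     return count
-- ===== Notes on version B (the rewrite author's own statement) =====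
-- stated objective: alternative
-- what changed: B precomputes a prefix-sum table once and replaces A's two inner summation loops and found-flag with a single uniform 'first index j >= i+minComps-1 with prefix[j+1]-prefix[i] >= threshold' search driving the greedy.
-- outside the precondition, e.g. on networks([1, 2, 3], -1, 10): A returns 0, B raises IndexError
import Mathlib
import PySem

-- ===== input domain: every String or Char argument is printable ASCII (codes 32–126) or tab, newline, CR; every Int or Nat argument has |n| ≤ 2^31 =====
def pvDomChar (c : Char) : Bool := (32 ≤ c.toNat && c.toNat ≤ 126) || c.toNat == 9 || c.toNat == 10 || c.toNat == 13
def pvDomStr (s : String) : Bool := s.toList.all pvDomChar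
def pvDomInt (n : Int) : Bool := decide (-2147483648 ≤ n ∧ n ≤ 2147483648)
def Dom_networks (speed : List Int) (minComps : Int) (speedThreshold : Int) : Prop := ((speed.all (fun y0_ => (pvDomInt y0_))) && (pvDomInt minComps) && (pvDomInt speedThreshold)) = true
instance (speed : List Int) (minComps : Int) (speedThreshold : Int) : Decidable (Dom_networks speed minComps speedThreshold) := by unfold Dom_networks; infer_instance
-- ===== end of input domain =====

-- B replaces A's two inner summation loops (window sum + extension with a found flag) by a
-- pfx-sum table built once and a single uniform first-hit search; same greedy jumps.

-- ===== PORT A =====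
-- speed[j]; inside Pre_networks every accessed index is in range, so the default is never used
def pvAt (speed : List Int) (j : Int) : Int := (PySem.List.pyGet? speed j).getD 0

-- the 'for j in range(i+minComps, n)' extension loop with its break: returns the j that hit, if any
def networksInnerA (speed : List Int) (T : Int) : List Int → Int → Option Int
  | [], _ => none
  | j :: rest, s =>
      let s' := s + pvAt speed j
      if s' ≥ T then some j else networksInnerA speed T rest s'

-- the outer while loop; fuel n+1 suffices since i strictly increases when minComps ≥ 1
def networksLoopA (speed : List Int) (m T n : Int) : Nat → Int → Int → Int
  | 0, _, acc => acc
  | Nat.succ fuel, i, acc =>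
    if i ≤ n - m then
      let sum0 := (PySem.List.pyRange i (min (i + m) n) 1).foldl (fun s j => s + pvAt speed j) 0
      if sum0 ≥ T then
        networksLoopA speed m T n fuel (i + m) (acc + 1)
      else
        match networksInnerA speed T (PySem.List.pyRange (i + m) n 1) sum0 with
        | some j => networksLoopA speed m T n fuel (j + 1) (acc + 1)
        | none => networksLoopA speed m T n fuel (i + 1) acc
    else acc

def networks (speed : List Int) (minComps : Int) (speedThreshold : Int) : Int :=
  networksLoopA speed minComps speedThreshold (speed.length : Int) (speed.length + 1) 0 0

-- ===== PORT B =====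
-- pfx[0..n]: pfx sums of speed
def pvPrefix (acc : Int) : List Int → List Int
  | [] => [acc]
  | x :: xs => acc :: pvPrefix (acc + x) xs

-- next((j for j in js if pfx[j+1] - base >= T), None)
def pvFirstHit (pfx : List Int) (base T : Int) : List Int → Option Int
  | [] => none
  | j :: rest =>
      if (PySem.List.pyGet? pfx (j + 1)).getD 0 - base ≥ T then some j
      else pvFirstHit pfx base T rest

def networksLoopB (pfx : List Int) (m T n : Int) : Nat → Int → Int → Int
  | 0, _, acc => acc
  | Nat.succ fuel, i, acc =>
    if i ≤ n - m then
      match pvFirstHit pfx ((PySem.List.pyGet? pfx i).getD 0) T (PySem.List.pyRange (i + m - 1) n 1) with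
      | none => networksLoopB pfx m T n fuel (i + 1) acc
      | some j => networksLoopB pfx m T n fuel (j + 1) (acc + 1)
    else acc

def networks_alt (speed : List Int) (minComps : Int) (speedThreshold : Int) : Int :=
  networksLoopB (pvPrefix 0 speed) minComps speedThreshold (speed.length : Int) (speed.length + 1) 0 0

-- ===== PRECONDITION & SPEC =====
-- Pre_ excludes minComps ≤ 0, on which A diverges (for speedThreshold ≤ 0) or reads elements
-- through negative-index wraparound / raises IndexError (for speedThreshold > 0); B raises there.
def Pre_networks (speed : List Int) (minComps : Int) (speedThreshold : Int) : Prop := 1 ≤ minComps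
instance (speed : List Int) (minComps : Int) (speedThreshold : Int) : Decidable (Pre_networks speed minComps speedThreshold) := by unfold Pre_networks; infer_instance
def pvWitness_networks : List Int × Int × Int := ([5, -3, 4, 2], 2, 3)

def Spec_networks (speed : List Int) (minComps : Int) (speedThreshold : Int) (out : Int) : Prop := out = networks_alt speed minComps speedThreshold
instance (speed : List Int) (minComps : Int) (speedThreshold : Int) (out : Int) : Decidable (Spec_networks speed minComps speedThreshold out) := by unfold Spec_networks; infer_instance

-- ===== CLAIM (what is proved, stated in full; the proofs are below) =====
def Claim_equal_networks : Prop := ∀ (speed : List Int) (minComps : Int) (speedThreshold : Int), Dom_networks speed minComps speedThreshold → Pre_networks speed minComps speedThreshold → Spec_networks speed minComps speedThreshold (networks speed minComps speedThreshold)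

-- ===== LEMMAS AND PROOFS =====

-- prefix value at index k, as the ports read it
def pfxGet (speed : List Int) (k : Int) : Int := (PySem.List.pyGet? (pvPrefix 0 speed) k).getD 0

theorem pfxGet_fold (speed : List Int) (k : Int) :
    (PySem.List.pyGet? (pvPrefix 0 speed) k).getD 0 = pfxGet speed k := rfl

theorem pvPrefix_getElem? (speed : List Int) (acc : Int) (k : Nat) (hk : k ≤ speed.length) :
    (pvPrefix acc speed)[k]? = some (acc + (speed.take k).sum) := by
  induction speed generalizing acc k with
  | nil =>
    have hk0 : k = 0 := Nat.le_zero.mp hk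
    subst hk0
    simp [pvPrefix]
  | cons x xs ih =>
    cases k with
    | zero => simp [pvPrefix]
    | succ k =>
      have := ih (acc + x) k (by simpa using hk)
      simp [pvPrefix, this, add_assoc]

theorem pfxGet_eq (speed : List Int) (k : Int) (hk0 : 0 ≤ k) (hk : k ≤ (speed.length : Int)) :
    pfxGet speed k = (speed.take k.toNat).sum := by
  have hk' : k.toNat ≤ speed.length := by omega
  rw [pfxGet, PySem.List.pyGet?_of_nonneg _ hk0, pvPrefix_getElem? speed 0 k.toNat hk']
  simp

theorem pvAt_eq (speed : List Int) (a : Int) (h0 : 0 ≤ a) (h1 : a < (speed.length : Int)) :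
    pvAt speed a = speed[a.toNat]'(by omega) := by
  rw [pvAt, PySem.List.pyGet?_eq_some_getElem _ h0 h1]
  rfl

theorem pfxGet_step (speed : List Int) (a : Int) (h0 : 0 ≤ a) (h1 : a < (speed.length : Int)) :
    pfxGet speed (a + 1) = pfxGet speed a + pvAt speed a := by
  have ha : a.toNat < speed.length := by omega
  rw [pfxGet_eq speed (a+1) (by omega) (by omega), pfxGet_eq speed a h0 (by omega),
    pvAt_eq speed a h0 h1]
  have h2 : (a + 1).toNat = a.toNat + 1 := by omega
  rw [h2, List.sum_take_succ _ _ ha]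

-- the window-sum loop computes a prefix difference
theorem windowSum_eq (speed : List Int) (b : Int) (hb : b ≤ (speed.length : Int)) :
    ∀ (a s0 : Int), 0 ≤ a → a ≤ b →
    (PySem.List.pyRange a b 1).foldl (fun s j => s + pvAt speed j) s0
      = s0 + (pfxGet speed b - pfxGet speed a) := by
  intro a s0 ha hab
  have hd : (b - a).toNat + a = b := by omega
  generalize hgen : (b - a).toNat = d at hd
  induction d generalizing a s0 with
  | zero =>
    have hba : b = a := by omega
    subst hba
    rw [PySem.List.pyRange_one_eq_nil le_rfl]
    simp
  | succ d ih =>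
    have hab' : a < b := by omega
    rw [PySem.List.pyRange_one_cons hab']
    simp only [List.foldl_cons]
    rw [ih (a + 1) (s0 + pvAt speed a) (by omega) (by omega) (by omega) (by omega),
      pfxGet_step speed a ha (by omega)]
    ring

theorem inner_eq (speed : List Int) (T : Int) (i : Int) (hi : 0 ≤ i) :
    ∀ (a : Int), i ≤ a → a ≤ (speed.length : Int) →
    networksInnerA speed T (PySem.List.pyRange a (speed.length : Int) 1)
        (pfxGet speed a - pfxGet speed i)
      = pvFirstHit (pvPrefix 0 speed) (pfxGet speed i) T
          (PySem.List.pyRange a (speed.length : Int) 1) := by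
  intro a hia han
  have hd : ((speed.length : Int) - a).toNat + a = (speed.length : Int) := by omega
  generalize hgen : ((speed.length : Int) - a).toNat = d at hd
  induction d generalizing a with
  | zero =>
    have hna : a = (speed.length : Int) := by omega
    subst hna
    rw [PySem.List.pyRange_one_eq_nil le_rfl]
    rfl
  | succ d ih =>
    have hab : a < (speed.length : Int) := by omega
    rw [PySem.List.pyRange_one_cons hab]
    have hstep : pfxGet speed a - pfxGet speed i + pvAt speed a
        = pfxGet speed (a + 1) - pfxGet speed i := by
      rw [pfxGet_step speed a (by omega) hab]; ring
    rw [networksInnerA, pvFirstHit]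
    simp only [pfxGet_fold, hstep]
    by_cases hc : pfxGet speed (a + 1) - pfxGet speed i ≥ T
    · rw [if_pos hc, if_pos hc]
    · rw [if_neg hc, if_neg hc]
      exact ih (a + 1) (by omega) (by omega) (by omega) (by omega)

theorem pvFirstHit_mem (pfx : List Int) (base T : Int) :
    ∀ (l : List Int) (j : Int), pvFirstHit pfx base T l = some j → j ∈ l := by
  intro l
  induction l with
  | nil => intro j h; simp [pvFirstHit] at h
  | cons x xs ih =>
    intro j h
    rw [pvFirstHit] at h
    by_cases hc : (PySem.List.pyGet? pfx (x + 1)).getD 0 - base ≥ T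
    · rw [if_pos hc] at h; simp at h; simp [h]
    · rw [if_neg hc] at h
      exact List.mem_cons_of_mem _ (ih j h)

theorem loops_eq (speed : List Int) (m T : Int) (hm : 1 ≤ m) :
    ∀ (fuel : Nat) (i acc : Int), 0 ≤ i →
      networksLoopA speed m T (speed.length : Int) fuel i acc
        = networksLoopB (pvPrefix 0 speed) m T (speed.length : Int) fuel i acc := by
  intro fuel
  induction fuel with
  | zero => intro i acc _; rfl
  | succ fuel ih =>
    intro i acc hi
    rw [networksLoopA, networksLoopB]
    by_cases hcond : i ≤ (speed.length : Int) - m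
    · rw [if_pos hcond, if_pos hcond]
      have hin : i + m ≤ (speed.length : Int) := by omega
      have hmin : min (i + m) (speed.length : Int) = i + m := by omega
      have hsum : (PySem.List.pyRange i (i + m) 1).foldl (fun s j => s + pvAt speed j) 0
          = pfxGet speed (i + m) - pfxGet speed i := by
        rw [windowSum_eq speed (i + m) hin i 0 hi (by omega)]; ring
      have hlt : i + m - 1 < (speed.length : Int) := by omega
      have hone : i + m - 1 + 1 = i + m := by ring
      rw [PySem.List.pyRange_one_cons hlt, pvFirstHit]
      simp only [hmin, hsum, hone, pfxGet_fold]
      by_cases hge : pfxGet speed (i + m) - pfxGet speed i ≥ T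
      · rw [if_pos hge, if_pos hge]
        show _ = networksLoopB (pvPrefix 0 speed) m T (speed.length : Int) fuel
            (i + m - 1 + 1) (acc + 1)
        rw [hone]
        exact ih (i + m) (acc + 1) (by omega)
      · rw [if_neg hge, if_neg hge]
        rw [inner_eq speed T i hi (i + m) (by omega) hin]
        cases hfh : pvFirstHit (pvPrefix 0 speed) (pfxGet speed i) T
            (PySem.List.pyRange (i + m) (speed.length : Int) 1) with
        | none => exact ih (i + 1) acc (by omega)
        | some j =>
          have hj := pvFirstHit_mem _ _ _ _ _ hfh
          rw [PySem.List.mem_pyRange_one] at hj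
          exact ih (j + 1) (acc + 1) (by omega)
    · rw [if_neg hcond, if_neg hcond]

-- ===== VERDICT (by name: the statement is the Claim_ definition above) =====
theorem networks_spec : Claim_equal_networks := by
  intro speed m T _ hpre
  unfold Spec_networks networks networks_alt
  exact loops_eq speed m T hpre _ 0 0 le_rfl
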